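-- pv_equiv track=rewrite | github.com/mmrahman21/my-leetcode-solutions | python solutions/prob_1814.py | transform
-- ===== SOURCE A (Python) =====
-- def transform(p):
--     main_p = p
--     p1 = 0
--     while p!=0:
--         rem = p % 10
--         p1 = p1*10 + rem
--         p //= 10
--
--     return main_p - p1
-- ===== SOURCE B (Python) =====
-- def transform(p):
--     return p - sum((ord(c) - 48) * 10 ** i for i, c in enumerate(str(p)))
-- ===== Notes on version B (the rewrite author's own statement) =====
-- stated objective: idiomatic
-- what changed: B replaces A's while-loop that reverses p arithmetically with a remainder/quotient step and a running accumulator by a closed positional sum over the decimal string (sum of digit value times base-power-of-index over enumerate(str(p))); there is no loop-carried accumulator and no division; Pre_ keeps only the non-negative inputs, since A never returns on the others.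
import Mathlib
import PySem

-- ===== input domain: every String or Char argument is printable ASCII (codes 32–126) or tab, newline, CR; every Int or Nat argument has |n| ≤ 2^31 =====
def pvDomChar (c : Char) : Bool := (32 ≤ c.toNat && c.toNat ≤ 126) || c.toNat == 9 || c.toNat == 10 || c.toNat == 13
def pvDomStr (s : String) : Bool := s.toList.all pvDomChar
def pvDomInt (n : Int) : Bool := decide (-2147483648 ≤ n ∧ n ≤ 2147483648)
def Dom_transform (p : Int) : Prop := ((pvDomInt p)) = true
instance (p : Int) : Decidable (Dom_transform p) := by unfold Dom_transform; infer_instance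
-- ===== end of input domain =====

-- B replaces A's arithmetic %10 // 10 reversal loop by a closed positional sum over the decimal string.
-- Pre_ restricts to 0 ≤ p: on negative p, A's while-loop never terminates (p //= 10 stalls at -1).

-- ===== PORT A =====
-- A's while-loop: fuel only makes the recursion total; for 0 ≤ p the fuel p.toNat + 1 is never exhausted.
def transformLoop : Nat → Int → Int → Int
  | 0, _, p1 => p1
  | fuel + 1, p, p1 =>
    if p = 0 then p1
    else transformLoop fuel (PySem.Int.floordiv p 10) (p1 * 10 + PySem.Int.mod p 10)

def transform (p : Int) : Int :=
  p - transformLoop (p.toNat + 1) p 0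

-- ===== PORT B =====
-- Source B: p - sum((ord(c) - 48) * 10 ** i for i, c in enumerate(str(p)))
def transform_alt (p : Int) : Int :=
  p - ((PySem.List.enumerate (PySem.Int.toStr p).toList 0).map
        (fun ic => ((ic.2.toNat : Int) - 48) * 10 ^ ic.1.toNat)).sum

-- ===== PRECONDITION & SPEC =====
-- Pre_ excludes p < 0, on which Python A loops forever (returns nothing).
def Pre_transform (p : Int) : Prop := 0 ≤ p
instance (p : Int) : Decidable (Pre_transform p) := by unfold Pre_transform; infer_instance
def pvWitness_transform : Int := 123

def Spec_transform (p : Int) (out : Int) : Prop := out = transform_alt p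
instance (p : Int) (out : Int) : Decidable (Spec_transform p out) := by unfold Spec_transform; infer_instance

-- ===== CLAIM (what is proved, stated in full; the proofs are below) =====
def Claim_equal_transform : Prop := ∀ (p : Int), Dom_transform p → Pre_transform p → Spec_transform p (transform p)

-- ===== LEMMAS AND PROOFS =====

-- value of a little-endian Int digit list (B-side helper for the proof only)
def pvVal : List Int → Int
  | [] => 0
  | d :: t => d + 10 * pvVal t

theorem pvVal_append_singleton (xs : List Int) (d : Int) :
    pvVal (xs ++ [d]) = pvVal xs + d * 10 ^ xs.length := by
  induction xs with
  | nil => simp [pvVal]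
  | cons x t ih => simp [pvVal, ih]; ring

-- A's loop over a Nat equals the foldl over its little-endian digits
theorem transformLoop_digits (n : Nat) : ∀ (fuel : Nat) (acc : Int), n < fuel →
    transformLoop fuel (n : Int) acc = (Nat.digits 10 n).foldl (fun (a : Int) (d : Nat) => a * 10 + (d : Int)) acc := by
  induction n using Nat.strong_induction_on with
  | _ n ih =>
    intro fuel acc hf
    match fuel, hf with
    | fuel + 1, hf =>
      by_cases h0 : n = 0
      · subst h0; simp [transformLoop]
      · have hn : 0 < n := Nat.pos_of_ne_zero h0
        have hd : Nat.digits 10 n = n % 10 :: Nat.digits 10 (n / 10) := Nat.digits_def' (by omega) hn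
        have hlt : n / 10 < n := Nat.div_lt_self hn (by omega)
        rw [show transformLoop (fuel + 1) (n : Int) acc
              = transformLoop fuel (PySem.Int.floordiv (n : Int) 10) (acc * 10 + PySem.Int.mod (n : Int) 10) by
              simp [transformLoop, h0]]
        rw [show PySem.Int.floordiv (n : Int) 10 = ((n / 10 : Nat) : Int) from
              (by exact_mod_cast PySem.Int.floordiv_natCast n 10),
            show PySem.Int.mod (n : Int) 10 = ((n % 10 : Nat) : Int) from
              (by exact_mod_cast PySem.Int.mod_natCast n 10)]
        rw [ih (n / 10) hlt fuel (acc * 10 + ((n % 10 : Nat) : Int)) (by omega), hd]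
        rw [List.foldl_cons]

-- foldl (a*10+d) acc over L = acc * 10^len + value of the reversed digit list
theorem foldl_digits_eq (L : List Nat) : ∀ acc : Int,
    L.foldl (fun (a : Int) (d : Nat) => a * 10 + (d : Int)) acc
      = acc * 10 ^ L.length + pvVal ((L.reverse).map (fun d : Nat => (d : Int))) := by
  induction L with
  | nil => intro acc; simp [pvVal]
  | cons d t ih =>
    intro acc
    rw [List.foldl_cons, List.reverse_cons, List.length_cons, ih, List.map_append,
        List.map_cons, List.map_nil, pvVal_append_singleton]
    simp
    ring

-- decimal digit chars of n (msd first) decode to the reversed digit list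
theorem toDigits_map_val (n : Nat) (hn : 0 < n) :
    (Nat.toDigits 10 n).map (fun c => ((c.toNat : Int) - 48)) = ((Nat.digits 10 n).reverse).map (fun d : Nat => (d : Int)) := by
  induction n using Nat.strong_induction_on with
  | _ n ih =>
    have hdcv : ∀ d : Nat, d < 10 → ((Nat.digitChar d).toNat : Int) - 48 = (d : Int) := by
      intro d hd; interval_cases d <;> decide
    by_cases h : n < 10
    · rw [Nat.toDigits_of_lt_base h, Nat.digits_def' (by omega) hn, Nat.div_eq_of_lt h]
      simp [hdcv n h, Nat.mod_eq_of_lt h]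
    · have h10 : 10 ≤ n := by omega
      rw [Nat.toDigits_of_base_le (by omega) h10, Nat.digits_def' (by omega) hn]
      have hq : 0 < n / 10 := Nat.div_pos h10 (by omega)
      have hlt : n / 10 < n := Nat.div_lt_self hn (by omega)
      rw [List.map_append, List.reverse_cons, List.map_append, ih (n / 10) hlt hq,
          List.map_cons, hdcv (n % 10) (Nat.mod_lt n (by omega))]
      simp

-- the enumerate-sum of B equals pvVal of the per-char values
theorem enum_sum (cs : List Char) : ∀ s : Nat,
    ((PySem.List.enumerate cs (s : Int)).map
        (fun ic => ((ic.2.toNat : Int) - 48) * 10 ^ ic.1.toNat)).sum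
      = 10 ^ s * pvVal (cs.map (fun c => ((c.toNat : Int) - 48))) := by
  induction cs with
  | nil => intro s; simp [PySem.List.enumerate_nil, pvVal]
  | cons c t ih =>
    intro s
    rw [PySem.List.enumerate_cons]
    simp only [List.map_cons, List.sum_cons, pvVal]
    have : ((s : Int) + 1) = ((s + 1 : Nat) : Int) := by push_cast; ring
    rw [this, ih (s + 1)]
    have hs : ((s : Int)).toNat = s := Int.toNat_natCast s
    rw [hs]
    ring

-- both sides compute Nat.ofDigits 10 (Nat.digits 10 n).reverse
theorem rev_eq (n : Nat) :
    transformLoop (n + 1) (n : Int) 0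
      = ((PySem.List.enumerate (PySem.Int.toStr (n : Int)).toList 0).map
          (fun ic => ((ic.2.toNat : Int) - 48) * 10 ^ ic.1.toNat)).sum := by
  rw [transformLoop_digits n (n + 1) 0 (by omega), foldl_digits_eq]
  rw [PySem.Int.toList_toStr]
  have hchars : PySem.Int.toChars (n : Int) = Nat.toDigits 10 n := by
    simp [PySem.Int.toChars]
  rw [hchars]
  have h0 : ((0 : Int)) = ((0 : Nat) : Int) := rfl
  rw [h0, enum_sum (Nat.toDigits 10 n) 0]
  by_cases hn : n = 0
  · subst hn; decide
  · rw [toDigits_map_val n (Nat.pos_of_ne_zero hn)]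
    ring

-- ===== VERDICT (by name: the statement is the Claim_ definition above) =====
theorem transform_spec : Claim_equal_transform := by
  intro p _ hpre
  unfold Spec_transform transform transform_alt
  obtain ⟨n, rfl⟩ : ∃ n : Nat, p = (n : Int) := ⟨p.toNat, (Int.toNat_of_nonneg hpre).symm⟩
  rw [show ((n : Int)).toNat = n from Int.toNat_natCast n, rev_eq n]
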